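-- pv_equiv track=rewrite | github.com/MaxShroyer/MD_RL_finetune_scripts | bone_fracture/build_bone_fracture_hf_dataset.py | _group_buckets
-- ===== SOURCE A (Python) =====
-- from typing import Any, Iterable, Mapping, Optional
--
-- def _group_buckets(rows: list[dict[str, Any]]) -> dict[str, list[str]]:
--     group_has_positive: dict[str, bool] = {}
--     for row in rows:
--         group_id = str(row["split_group_id"])
--         has_positive = int(row.get("class_count", 0)) > 0
--         group_has_positive[group_id] = group_has_positive.get(group_id, False) or has_positive
--     buckets = {"positive": [], "empty": []}
--     for group_id, has_positive in sorted(group_has_positive.items()):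
--         buckets["positive" if has_positive else "empty"].append(group_id)
--     return buckets
-- ===== SOURCE B (Python) =====
-- from typing import Any
--
--
-- def _group_buckets(rows: list[dict[str, Any]]) -> dict[str, list[str]]:
--     # Stage 1: project each row to a (group_id, is_positive) pair.
--     pairs = [(str(r["split_group_id"]), int(r.get("class_count", 0)) > 0) for r in rows]
--     # Stage 2: sorted distinct group ids.
--     gids = sorted({g for g, _ in pairs})
--     # Stage 3: a group is positive iff ANY of its pairs is positive (rescan per group).
--     def is_pos(g: str) -> bool:
--         return any(f for h, f in pairs if h == g)
--     return {"positive": [g for g in gids if is_pos(g)],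
--             "empty": [g for g in gids if not is_pos(g)]}
-- ===== Notes on version B (the rewrite author's own statement) =====
-- stated objective: alternative
-- what changed: A aggregates an OR-flag per group in a dict during one pass and then splits one sorted items pass into the two buckets; B does no aggregation at all: it projects rows to (gid, flag) pairs, takes the sorted distinct gids, and classifies each gid by rescanning the pairs with any(), a staged distinct-keys + per-key rescan instead of hash aggregation.
import Mathlib
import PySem

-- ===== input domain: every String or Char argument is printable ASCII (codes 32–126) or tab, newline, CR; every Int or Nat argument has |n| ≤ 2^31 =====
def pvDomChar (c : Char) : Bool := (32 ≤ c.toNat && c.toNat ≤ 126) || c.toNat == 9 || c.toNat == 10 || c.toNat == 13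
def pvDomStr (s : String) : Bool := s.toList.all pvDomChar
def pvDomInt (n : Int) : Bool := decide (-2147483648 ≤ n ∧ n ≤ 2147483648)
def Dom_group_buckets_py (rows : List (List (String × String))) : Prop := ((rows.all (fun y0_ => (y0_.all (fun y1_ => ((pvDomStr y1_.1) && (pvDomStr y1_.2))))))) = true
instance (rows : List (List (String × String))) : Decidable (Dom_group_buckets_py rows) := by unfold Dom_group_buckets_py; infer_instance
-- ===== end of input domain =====

-- B replaces A's dict-of-bool OR-aggregation + one branching pass over sorted items by staged passes:
-- project to (gid, flag) pairs, sort the distinct gids, classify each gid by an any() rescan of the pairs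
-- (alternative decomposition; B does a per-group rescan, O(g*n), instead of A's hash aggregation).


-- shared per-row helpers (both Pythons compute these identically):
-- str(row["split_group_id"])  (Pre_ guarantees the key is present)
def pvGid (row : List (String × String)) : String :=
  ((PySem.Dict.mk row).get? "split_group_id").getD ""
-- int(row.get("class_count", 0))  (Pre_ guarantees the string parses)
def pvCC (row : List (String × String)) : Int :=
  match (PySem.Dict.mk row).get? "class_count" with
  | none => 0
  | some s => (PySem.Int.ofStr? s).getD 0
-- int(row.get("class_count", 0)) > 0
def pvHp (row : List (String × String)) : Bool := decide (0 < pvCC row)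

-- ===== PORT A =====
def group_buckets_py (rows : List (List (String × String))) : List (String × List String) :=
  -- first loop: group_has_positive[gid] = group_has_positive.get(gid, False) or has_positive
  let ghp : PySem.Dict String Bool :=
    rows.foldl (fun d row => d.insert (pvGid row) (d.getD (pvGid row) false || pvHp row))
      PySem.Dict.empty
  -- second loop: append each gid of sorted(items) to buckets["positive"/"empty"]
  let buckets : PySem.Dict String (List String) :=
    (PySem.List.sorted2 ghp.items (fun p => p.1) (fun p => p.2)).foldl
      (fun b p => b.modify (if p.2 then "positive" else "empty") [] (fun l => l ++ [p.1]))
      ((PySem.Dict.empty.insert "positive" []).insert "empty" [])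
  buckets.items

-- ===== PORT B =====
def group_buckets_py_alt (rows : List (List (String × String))) : List (String × List String) :=
  -- stage 1: pairs = [(str(gid), flag)]
  let pairs : List (String × Bool) := rows.map (fun r => (pvGid r, pvHp r))
  -- stage 2: gids = sorted({g for g, _ in pairs})
  let gids : List String :=
    PySem.List.sorted (PySem.Set.ofList (pairs.map (fun p => p.1))) (fun x => x)
  -- stage 3: classify each gid by rescanning the pairs with any()
  [("positive", gids.filter (fun g => pairs.any (fun p => p.1 == g && p.2))),
   ("empty", gids.filter (fun g => !(pairs.any (fun p => p.1 == g && p.2))))]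

-- ===== PRECONDITION & SPEC =====
-- Pre_ excludes exactly the rows where Python A raises: a missing "split_group_id" key (KeyError)
-- or a "class_count" value that int() cannot parse (ValueError).
def Pre_group_buckets_py (rows : List (List (String × String))) : Prop :=
  (rows.all (fun row =>
    ((PySem.Dict.mk row).get? "split_group_id").isSome &&
    ((((PySem.Dict.mk row).get? "class_count").map
        (fun s => (PySem.Int.ofStr? s).isSome)).getD true))) = true
instance (rows : List (List (String × String))) : Decidable (Pre_group_buckets_py rows) := by
  unfold Pre_group_buckets_py; infer_instance
def pvWitness_group_buckets_py : (List (List (String × String))) :=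
  [[("split_group_id", "g1"), ("class_count", "2")], [("split_group_id", "g0")]]
def Spec_group_buckets_py (rows : List (List (String × String))) (out : List (String × List String)) : Prop := out = group_buckets_py_alt rows
instance (rows : List (List (String × String))) (out : List (String × List String)) : Decidable (Spec_group_buckets_py rows out) := by unfold Spec_group_buckets_py; infer_instance

-- ===== CLAIM (what is proved, stated in full; the proofs are below) =====
def Claim_equal_group_buckets_py : Prop := ∀ (rows : List (List (String × String))), Dom_group_buckets_py rows → Pre_group_buckets_py rows → Spec_group_buckets_py rows (group_buckets_py rows)

-- ===== LEMMAS AND PROOFS =====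

-- bucket-loop step lemmas
lemma bucket_step_pos (P E : List String) (g : String) :
    (PySem.Dict.mk [("positive",P),("empty",E)]).modify "positive" [] (fun l => l ++ [g])
      = PySem.Dict.mk [("positive",P++[g]),("empty",E)] := by
  simp [PySem.Dict.modify, PySem.Dict.insert, PySem.Dict.getD, PySem.Dict.get?]

lemma bucket_step_emp (P E : List String) (g : String) :
    (PySem.Dict.mk [("positive",P),("empty",E)]).modify "empty" [] (fun l => l ++ [g])
      = PySem.Dict.mk [("positive",P),("empty",E++[g])] := by
  simp [PySem.Dict.modify, PySem.Dict.insert, PySem.Dict.getD, PySem.Dict.get?]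

-- A's second loop, characterized
lemma bucket_fold (its : List (String × Bool)) : ∀ (P E : List String),
    its.foldl (fun b p => b.modify (if p.2 then "positive" else "empty") [] (fun l => l ++ [p.1]))
        (PySem.Dict.mk [("positive",P),("empty",E)])
      = PySem.Dict.mk [("positive", P ++ (its.filter (·.2)).map (·.1)),
                       ("empty", E ++ (its.filter (fun p => !p.2)).map (·.1))] := by
  induction its with
  | nil => simp
  | cons p t ih =>
    intro P E
    by_cases hp : p.2
    · simp only [List.foldl_cons, hp, if_true]
      rw [bucket_step_pos, ih]
      simp [hp]
    · have hpb : p.2 = false := by simpa using hp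
      simp only [List.foldl_cons, hpb, Bool.false_eq_true, if_false]
      rw [bucket_step_emp, ih]
      simp [hpb]

-- insertBy with congruent comparators
lemma insertBy_congr {α : Type} (b1 b2 : α → α → Bool) (x : α) (ys : List α)
    (h : ∀ y ∈ ys, b1 x y = b2 x y) :
    PySem.List.insertBy b1 x ys = PySem.List.insertBy b2 x ys := by
  induction ys with
  | nil => rfl
  | cons y t ih =>
    simp only [PySem.List.insertBy]
    rw [h y (by simp)]
    by_cases hb : b2 x y
    · simp [hb]
    · simp only [Bool.not_eq_true] at hb
      simp [hb, ih (fun z hz => h z (by simp [hz]))]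

-- the lexicographic tuple comparator reduces to the fst comparator on distinct fsts
lemma lex_eq_fst (x y : String × Bool) (h : x.1 ≠ y.1) :
    (decide (x.1 < y.1) || (!decide (y.1 < x.1) && decide (x.2 < y.2))) = decide (x.1 < y.1) := by
  rcases lt_or_gt_of_ne h with hlt | hgt
  · simp [hlt, not_lt_of_gt hlt]
  · simp [hgt, not_lt_of_gt hgt]

-- sorted2 by (fst, snd) = sorted by fst when fsts are distinct
lemma foldl_insertBy_lex (xs : List (String × Bool)) : ∀ (acc : List (String × Bool)),
    (∀ a ∈ acc, ∀ b ∈ xs, a.1 ≠ b.1) → (xs.map (·.1)).Nodup →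
    xs.foldl (fun a x => PySem.List.insertBy
        (fun a b => decide (a.1 < b.1) || (!decide (b.1 < a.1) && decide (a.2 < b.2))) x a) acc
      = xs.foldl (fun a x => PySem.List.insertBy (fun a b => decide (a.1 < b.1)) x a) acc := by
  induction xs with
  | nil => intro acc _ _; rfl
  | cons x t ih =>
    intro acc hdisj hnd
    simp only [List.map_cons, List.nodup_cons, List.mem_map] at hnd
    simp only [List.foldl_cons]
    rw [insertBy_congr _ (fun a b => decide (a.1 < b.1)) x acc (fun y hy => lex_eq_fst x y
      (fun he => hdisj y hy x (by simp) he.symm))]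
    apply ih
    · intro a ha b hb
      rcases (PySem.List.mem_insertBy _ x a acc).mp ha with rfl | ha'
      · exact fun he => hnd.1 ⟨b, hb, he.symm⟩
      · exact hdisj a ha' b (by simp [hb])
    · exact hnd.2

lemma sorted2_eq_sorted_fst (xs : List (String × Bool)) (h : (xs.map (·.1)).Nodup) :
    PySem.List.sorted2 xs (fun p => p.1) (fun p => p.2)
      = PySem.List.sorted xs (fun p => p.1) := by
  simp only [PySem.List.sorted2, PySem.List.sorted, if_neg (by decide : ¬ (false = true))]
  exact foldl_insertBy_lex xs [] (by simp) h

-- the invariant tying A's dict to the (all gids, positive gids) sets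
def pvInv (d : PySem.Dict String Bool) (aS pS : List String) : Prop :=
  d.items = aS.map (fun g => (g, PySem.Set.contains pS g)) ∧ aS.Nodup ∧ pS.Nodup ∧
    ∀ g ∈ pS, g ∈ aS

lemma pvInv_keys {d aS pS} (h : pvInv d aS pS) : d.keys = aS := by
  simp only [PySem.Dict.keys, h.1, List.map_map]
  have he : ((fun x : String × Bool => x.1) ∘ fun g => (g, PySem.Set.contains pS g)) = id := rfl
  rw [he, List.map_id]

lemma pvInv_step {d aS pS} (h : pvInv d aS pS) (row : List (String × String)) :
    pvInv (d.insert (pvGid row) (d.getD (pvGid row) false || pvHp row))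
      (PySem.Set.add aS (pvGid row))
      (if pvHp row then PySem.Set.add pS (pvGid row) else pS) := by
  obtain ⟨hit, hnda, hndp, hsub⟩ := h
  set g := pvGid row with hg
  have hkeys : d.keys = aS := pvInv_keys ⟨hit, hnda, hndp, hsub⟩
  have hndk : d.keys.Nodup := by rw [hkeys]; exact hnda
  have hcontains : ∀ a : String, a ≠ g →
      PySem.Set.contains (if pvHp row then PySem.Set.add pS g else pS) a = PySem.Set.contains pS a := by
    intro a hne
    by_cases hp : pvHp row
    · simp [hp, PySem.Set.mem_add, hne]
    · simp [hp]
  by_cases hmem : g ∈ aS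
  · have hc : d.contains g = true := by
      rw [PySem.Dict.contains_iff_mem_keys, hkeys]; exact hmem
    have hgd : d.getD g false = PySem.Set.contains pS g :=
      PySem.Dict.getD_of_mem_items d (by rw [hit]; exact List.mem_map_of_mem hmem) hndk false
    have hcg : PySem.Set.contains (if pvHp row then PySem.Set.add pS g else pS) g
        = (PySem.Set.contains pS g || pvHp row) := by
      by_cases hp : pvHp row
      · simp [hp, PySem.Set.mem_add]
      · simp [hp]
    refine ⟨?_, ?_, ?_, ?_⟩
    · rw [PySem.Dict.items_insert_of_contains d _ hc, hit, List.map_map,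
        PySem.Set.add_of_mem hmem]
      apply List.map_congr_left
      intro a ha
      by_cases hae : a = g
      · subst hae
        simp only [Function.comp_apply, beq_self_eq_true, if_true, hgd, hcg]
      · simp only [Function.comp_apply, beq_iff_eq]
        rw [if_neg hae, hcontains a hae]
    · rw [PySem.Set.add_of_mem hmem]; exact hnda
    · by_cases hp : pvHp row
      · simp only [hp, if_true]; exact PySem.Set.nodup_add pS g hndp
      · simpa [hp] using hndp
    · intro a ha
      rw [PySem.Set.add_of_mem hmem]
      by_cases hp : pvHp row
      · rw [hp, if_pos rfl, PySem.Set.mem_add] at ha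
        rcases ha with ha | rfl
        · exact hsub a ha
        · exact hmem
      · simp only [hp] at ha; simp at ha; exact hsub a ha
  · have hc : d.contains g = false := by
      rw [← Bool.not_eq_true, PySem.Dict.contains_iff_mem_keys, hkeys]; exact hmem
    have hgd : d.getD g false = false := PySem.Dict.getD_of_not_contains d false hc
    have hgp : g ∉ pS := fun hgp => hmem (hsub g hgp)
    have hcg : PySem.Set.contains (if pvHp row then PySem.Set.add pS g else pS) g = pvHp row := by
      by_cases hp : pvHp row
      · simp [hp, PySem.Set.mem_add]
      · simp [hp, hgp]
    refine ⟨?_, ?_, ?_, ?_⟩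
    · rw [PySem.Dict.items_insert_of_not_contains d _ hc, hit,
        PySem.Set.add_of_not_mem hmem, List.map_append]
      simp only [List.map_cons, List.map_nil]
      rw [hgd, hcg]
      congr 1
      apply List.map_congr_left
      intro a ha
      rw [hcontains a (fun he => hmem (he ▸ ha))]
    · rw [PySem.Set.add_of_not_mem hmem]
      refine hnda.append (by simp) ?_
      intro a ha hb
      simp only [List.mem_singleton] at hb
      subst hb
      exact hmem ha
    · by_cases hp : pvHp row
      · simp only [hp, if_true]; exact PySem.Set.nodup_add pS g hndp
      · simpa [hp] using hndp
    · intro a ha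
      rw [PySem.Set.add_of_not_mem hmem, List.mem_append]
      by_cases hp : pvHp row
      · rw [hp, if_pos rfl, PySem.Set.mem_add] at ha
        rcases ha with ha | rfl
        · exact Or.inl (hsub a ha)
        · exact Or.inr (by simp)
      · simp only [hp] at ha; simp at ha; exact Or.inl (hsub a ha)

lemma pvInv_fold (rows : List (List (String × String))) : ∀ d aS pS, pvInv d aS pS →
    pvInv (rows.foldl (fun d row => d.insert (pvGid row) (d.getD (pvGid row) false || pvHp row)) d)
      (rows.foldl (fun s row => PySem.Set.add s (pvGid row)) aS)
      (rows.foldl (fun s row => if pvHp row then PySem.Set.add s (pvGid row) else s) pS) := by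
  induction rows with
  | nil => intro d aS pS h; exact h
  | cons row t ih =>
    intro d aS pS h
    exact ih _ _ _ (pvInv_step h row)

lemma sorted_nodup_pairwise_lt (aS : List String) (h : aS.Nodup) :
    (PySem.List.sorted aS (fun x => x)).Pairwise (· < ·) := by
  have hle := PySem.List.sorted_pairwise aS (fun x => x)
  have hnd : (PySem.List.sorted aS (fun x => x) false).Nodup :=
    (PySem.List.sorted_perm aS (fun x => x) false).symm.nodup h
  exact (hle.and hnd).imp (fun {a b} hab => lt_of_le_of_ne hab.1 hab.2)

lemma filter_sorted_eq (aS pS : List String) (hnda : aS.Nodup) (c : String → Bool)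
    (hperm : (aS.filter c).Perm pS) :
    (PySem.List.sorted aS (fun x => x)).filter c = PySem.List.sorted pS (fun x => x) := by
  refine (PySem.List.sorted_eq_of_perm_of_pairwise_lt pS _ (fun x => x) ?_ ?_).symm
  · exact (((PySem.List.sorted_perm aS (fun x => x) false).filter c).trans hperm).symm.symm
  · exact (sorted_nodup_pairwise_lt aS hnda).filter c

-- B's "all gids" set is the same fold A's analysis uses
lemma aS_eq_ofList (rows : List (List (String × String))) :
    rows.foldl (fun s row => PySem.Set.add s (pvGid row)) PySem.Set.empty
      = PySem.Set.ofList (rows.map pvGid) := by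
  rw [← PySem.Set.update_map_eq_foldl_add]
  rfl

-- membership in the positive-gids fold = existence of a positive row with that gid
lemma mem_pS_fold (rows : List (List (String × String))) (a : String) : ∀ (s0 : List String),
    (a ∈ rows.foldl (fun s row => if pvHp row then PySem.Set.add s (pvGid row) else s) s0)
      ↔ a ∈ s0 ∨ ∃ r ∈ rows, pvGid r = a ∧ pvHp r = true := by
  induction rows with
  | nil => intro s0; simp
  | cons row t ih =>
    intro s0
    simp only [List.foldl_cons]
    by_cases hp : pvHp row
    · rw [hp, if_pos rfl, ih, PySem.Set.mem_add]
      constructor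
      · rintro (⟨h | rfl⟩ | ⟨r, hr, hg, hh⟩)
        · exact Or.inl h
        · exact Or.inr ⟨row, by simp, rfl, hp⟩
        · exact Or.inr ⟨r, by simp [hr], hg, hh⟩
      · rintro (h | ⟨r, hr, hg, hh⟩)
        · exact Or.inl (Or.inl h)
        · rcases List.mem_cons.mp hr with rfl | hr'
          · exact Or.inl (Or.inr hg.symm)
          · exact Or.inr ⟨r, hr', hg, hh⟩
    · simp only [hp, Bool.false_eq_true, if_false]
      rw [ih]
      constructor
      · rintro (h | ⟨r, hr, hg, hh⟩)
        · exact Or.inl h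
        · exact Or.inr ⟨r, by simp [hr], hg, hh⟩
      · rintro (h | ⟨r, hr, hg, hh⟩)
        · exact Or.inl h
        · rcases List.mem_cons.mp hr with rfl | hr'
          · exact absurd hh hp
          · exact Or.inr ⟨r, hr', hg, hh⟩

-- B's any() rescan computes exactly membership in the positive-gids fold
lemma any_eq_contains (rows : List (List (String × String))) (g : String) :
    (rows.map (fun r => (pvGid r, pvHp r))).any (fun p => p.1 == g && p.2)
      = PySem.Set.contains
          (rows.foldl (fun s row => if pvHp row then PySem.Set.add s (pvGid row) else s)
            PySem.Set.empty) g := by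
  rw [PySem.Set.contains_eq_decide, Bool.eq_iff_iff]
  simp only [List.any_map, List.any_eq_true, Function.comp_apply, Bool.and_eq_true, beq_iff_eq,
    decide_eq_true_eq, mem_pS_fold rows g PySem.Set.empty]
  constructor
  · rintro ⟨r, hr, hg, hh⟩
    exact Or.inr ⟨r, hr, hg, hh⟩
  · rintro (h | ⟨r, hr, hg, hh⟩)
    · simp [PySem.Set.empty] at h
    · exact ⟨r, hr, hg, hh⟩

theorem main_eq (rows : List (List (String × String))) :
    group_buckets_py rows = group_buckets_py_alt rows := by
  unfold group_buckets_py group_buckets_py_alt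
  dsimp only
  obtain ⟨hit, hnda, hndp, hsub⟩ :=
    pvInv_fold rows PySem.Dict.empty PySem.Set.empty PySem.Set.empty ⟨rfl, List.nodup_nil, List.nodup_nil, by simp⟩
  set aS := rows.foldl (fun s row => PySem.Set.add s (pvGid row)) PySem.Set.empty with haS
  set pS := rows.foldl (fun s row => if pvHp row then PySem.Set.add s (pvGid row) else s)
      PySem.Set.empty with hpS
  set f : String → String × Bool := fun g => (g, PySem.Set.contains pS g) with hf
  have hfst : ((aS.map f).map (fun p => p.1)) = aS := by
    rw [List.map_map]
    have he : ((fun p : String × Bool => p.1) ∘ f) = id := rfl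
    rw [he, List.map_id]
  rw [hit, sorted2_eq_sorted_fst _ (by rw [hfst]; exact hnda)]
  have hsa : PySem.List.sorted (aS.map f) (fun p => p.1)
      = (PySem.List.sorted aS (fun x => x)).map f := by
    refine PySem.List.sorted_eq_of_perm_of_pairwise_lt _ _ _
      ((PySem.List.sorted_perm aS (fun x => x) false).map f) ?_
    rw [List.pairwise_map]
    exact sorted_nodup_pairwise_lt aS hnda
  rw [hsa,
    show ((PySem.Dict.empty.insert "positive" ([] : List String)).insert "empty" [])
        = PySem.Dict.mk [("positive", []), ("empty", [])] from rfl,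
    bucket_fold]
  have hmm : ∀ c : (String × Bool) → Bool,
      (((PySem.List.sorted aS (fun x => x)).map f).filter c).map (fun p => p.1)
        = (PySem.List.sorted aS (fun x => x)).filter (c ∘ f) := by
    intro c
    rw [List.filter_map, List.map_map]
    have he : ((fun p : String × Bool => p.1) ∘ f) = id := rfl
    rw [he, List.map_id]
  have hposm : ∀ a, a ∈ aS.filter (fun g => PySem.Set.contains pS g) ↔ a ∈ pS := by
    intro a
    simp only [List.mem_filter, PySem.Set.contains_eq_decide, decide_eq_true_eq]
    exact ⟨fun h => h.2, fun h => ⟨hsub a h, h⟩⟩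
  have hpos : (((PySem.List.sorted aS (fun x => x)).map f).filter (fun p => p.2)).map
      (fun p => p.1) = PySem.List.sorted pS (fun x => x) := by
    rw [hmm]
    exact filter_sorted_eq aS pS hnda _
      (((List.perm_ext_iff_of_nodup (hnda.filter _) hndp).mpr hposm))
  have hemp : (((PySem.List.sorted aS (fun x => x)).map f).filter (fun p => !p.2)).map
      (fun p => p.1) = PySem.List.sorted (PySem.Set.diff aS pS) (fun x => x) := by
    rw [hmm, PySem.Set.diff.eq_1]
    exact filter_sorted_eq aS _ hnda _ (List.Perm.refl _)
  simp only [List.nil_append]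
  rw [hpos, hemp]
  -- now the B side: gids = sorted aS, and the any() filters = contains pS / its negation
  have hmapfst : (rows.map (fun r => (pvGid r, pvHp r))).map (fun p : String × Bool => p.1)
      = rows.map pvGid := by
    rw [List.map_map]; rfl
  have hgids : PySem.List.sorted
        (PySem.Set.ofList ((rows.map (fun r => (pvGid r, pvHp r))).map (fun p => p.1)))
        (fun x => x)
      = PySem.List.sorted aS (fun x => x) := by
    rw [hmapfst, haS, aS_eq_ofList]
  have hanyc : (fun g => (rows.map (fun r => (pvGid r, pvHp r))).any (fun p => p.1 == g && p.2))
      = (fun g => PySem.Set.contains pS g) := by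
    funext g
    rw [any_eq_contains rows g, hpS]
  have hanyn : (fun g => !((rows.map (fun r => (pvGid r, pvHp r))).any (fun p => p.1 == g && p.2)))
      = (fun g => !PySem.Set.contains pS g) := by
    funext g
    rw [any_eq_contains rows g, hpS]
  rw [hgids, hanyc, hanyn]
  have hfc : (PySem.List.sorted aS (fun x => x)).filter (fun g => PySem.Set.contains pS g)
      = PySem.List.sorted pS (fun x => x) := by
    exact filter_sorted_eq aS pS hnda _
      (((List.perm_ext_iff_of_nodup (hnda.filter _) hndp).mpr hposm))
  have hfe : (PySem.List.sorted aS (fun x => x)).filter (fun g => !PySem.Set.contains pS g)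
      = PySem.List.sorted (PySem.Set.diff aS pS) (fun x => x) := by
    rw [PySem.Set.diff.eq_1]
    exact filter_sorted_eq aS _ hnda _ (List.Perm.refl _)
  rw [hfc, hfe]

-- ===== VERDICT (by name: the statement is the Claim_ definition above) =====
theorem group_buckets_py_spec : Claim_equal_group_buckets_py := by
  intro rows _ _
  unfold Spec_group_buckets_py
  exact main_eq rows
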